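-- pv_equiv track=rewrite | github.com/fabioz/ConfluenceWikiAndRST | src/rst_2_wiki.py | _ContainsOnlySameChar
-- ===== SOURCE A (Python) =====
-- def _ContainsOnlySameChar(line):
--     stripped = line.strip()
--     if len(stripped) == 0:
--         return False
--     old = None
--     for c in stripped:
--         if old is not None:
--             if old != c:
--                 return False
--         old = c
--     return True
-- ===== SOURCE B (Python) =====
-- def _ContainsOnlySameChar(line):
--     return len(set(line.strip())) == 1
-- ===== Notes on version B (the rewrite author's own statement) =====
-- stated objective: idiomatic
-- what changed: Replaces the previous-char tracking loop with early exit by a one-liner that builds the set of distinct characters of the stripped line and tests that exactly one is present (empty line gives a 0-sized set, hence False).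
import Mathlib
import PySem

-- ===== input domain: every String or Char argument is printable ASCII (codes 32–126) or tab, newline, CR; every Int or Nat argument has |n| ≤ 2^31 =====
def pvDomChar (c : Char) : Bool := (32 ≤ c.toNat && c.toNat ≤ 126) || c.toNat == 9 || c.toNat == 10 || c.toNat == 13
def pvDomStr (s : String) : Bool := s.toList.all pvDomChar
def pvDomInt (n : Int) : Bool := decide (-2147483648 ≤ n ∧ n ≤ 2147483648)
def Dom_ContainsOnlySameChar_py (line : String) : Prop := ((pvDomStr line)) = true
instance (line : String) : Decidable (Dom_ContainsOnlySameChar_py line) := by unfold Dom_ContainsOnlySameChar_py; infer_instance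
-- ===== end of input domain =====

-- B replaces A's previous-char tracking loop (with early exit) by a distinct-character
-- set test: len(set(line.strip())) == 1.  Objective: idiomatic; no speed claim.

-- ===== PORT A =====
-- the 'for c in stripped' loop with the running 'old' variable and the early 'return False'
def pvLoopA : Option Char → List Char → Bool
  | _, [] => true
  | old, c :: rest =>
    match old with
    | some o => if o ≠ c then false else pvLoopA (some c) rest
    | none => pvLoopA (some c) rest

def ContainsOnlySameChar_py (line : String) : Bool :=
  let stripped := PySem.Str.strip line
  if PySem.Str.len stripped = 0 then false
  else pvLoopA none stripped.toList

-- ===== PORT B =====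
def ContainsOnlySameChar_py_alt (line : String) : Bool :=
  PySem.Set.len (PySem.Set.ofList (PySem.Str.strip line).toList) = 1

-- ===== PRECONDITION & SPEC =====
def Spec_ContainsOnlySameChar_py (line : String) (out : Bool) : Prop := out = ContainsOnlySameChar_py_alt line
instance (line : String) (out : Bool) : Decidable (Spec_ContainsOnlySameChar_py line out) := by unfold Spec_ContainsOnlySameChar_py; infer_instance

-- ===== CLAIM (what is proved, stated in full; the proofs are below) =====
def Claim_equal_ContainsOnlySameChar_py : Prop := ∀ (line : String), Dom_ContainsOnlySameChar_py line → Spec_ContainsOnlySameChar_py line (ContainsOnlySameChar_py line)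

-- ===== LEMMAS AND PROOFS =====

-- A's loop, once seeded with a first char c, accepts exactly the lists all of whose chars are c.
theorem pvLoopA_some (l : List Char) : ∀ c : Char, pvLoopA (some c) l = l.all (· == c) := by
  induction l with
  | nil => intro c; simp [pvLoopA]
  | cons d rest ih =>
    intro c
    by_cases h : c = d
    · subst h
      simp [pvLoopA, ih]
    · simp [pvLoopA, h, Ne.symm h]

-- the distinct-character set of c :: l is a singleton iff every char of l equals c
theorem pvSetLen_one (c : Char) (l : List Char) :
    (decide (PySem.Set.len (PySem.Set.ofList (c :: l)) = 1)) = l.all (· == c) := by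
  rw [PySem.Set.ofList_cons]
  rcases h : PySem.Set.discard (PySem.Set.ofList l) c with _ | ⟨d, t⟩
  · simp only [PySem.Set.len]
    have : l.all (· == c) = true := by
      rw [List.all_eq_true]
      intro x hx
      by_contra hne
      have hx' : x ∈ PySem.Set.discard (PySem.Set.ofList l) c := by
        rw [PySem.Set.mem_discard]
        exact ⟨(PySem.Set.mem_ofList l x).2 hx, by simpa using hne⟩
      rw [h] at hx'
      simp at hx'
    simp [this]
  · simp only [PySem.Set.len]
    have hd : d ∈ PySem.Set.discard (PySem.Set.ofList l) c := by rw [h]; simp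
    rw [PySem.Set.mem_discard, PySem.Set.mem_ofList l d] at hd
    have : l.all (· == c) = false := by
      rw [List.all_eq_false]
      exact ⟨d, hd.1, by simpa using hd.2⟩
    rw [this]
    simp [List.length]
    omega

-- the whole equivalence, stated over the stripped character list
theorem pvMainList (l : List Char) :
    (if ((l.length : Int)) = 0 then false else pvLoopA none l)
      = decide (PySem.Set.len (PySem.Set.ofList l) = 1) := by
  rcases l with _ | ⟨c, rest⟩
  · simp [PySem.Set.len, PySem.Set.ofList]
  · have h0 : ¬ (((c :: rest).length : Int) = 0) := by
      simp only [List.length_cons]; push_cast; omega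
    rw [if_neg h0, pvLoopA, pvLoopA_some, ← pvSetLen_one c rest]

-- ===== VERDICT (by name: the statement is the Claim_ definition above) =====
theorem ContainsOnlySameChar_py_spec : Claim_equal_ContainsOnlySameChar_py := by
  intro line _
  unfold Spec_ContainsOnlySameChar_py ContainsOnlySameChar_py ContainsOnlySameChar_py_alt
  simp only [PySem.Str.len_eq, ← String.length_toList]
  exact pvMainList (PySem.Str.strip line).toList
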